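-- pv_equiv track=rewrite | github.com/YounesBensafia/apriori-qos-asd | from_arff_to_csv.py | convert_arff_to_csv
-- ===== SOURCE A (Python) =====
-- def convert_arff_to_csv(content):
--     data_section = False
--     header = []
--     csv_content = []
--
--     for line in content:
--         line = line.strip()
--         if not line or line.startswith('%'):  # Skip empty lines and comments
--             continue
--
--         if not data_section:
--             if "@attribute" in line.lower():
--                 # Extract attribute name, handling quoted names
--                 parts = line.split(None, 2)
--                 attr_name = parts[1].strip("'\"")
--                 header.append(attr_name)
--             elif "@data" in line.lower():
--                 data_section = True
--                 csv_content.append(','.join(header) + '\n')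
--         else:
--             # Only append non-empty data lines
--             if line:
--                 csv_content.append(line + '\n')
--
--     return csv_content
-- ===== SOURCE B (Python) =====
-- def convert_arff_to_csv(content):
--     def is_data(s):
--         l = s.strip()
--         return bool(l) and not l.startswith('%') and '@data' in l.lower() and '@attribute' not in l.lower()
--
--     split = next((i for i, s in enumerate(content) if is_data(s)), None)
--     if split is None:
--         return []
--     header = []
--     for s in content[:split]:
--         l = s.strip()
--         if l and not l.startswith('%') and '@attribute' in l.lower():
--             header.append(l.split(None, 2)[1].strip('\'"'))
--     rows = [','.join(header) + '\n']
--     for s in content[split + 1:]: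
--         l = s.strip()
--         if l and not l.startswith('%'):
--             rows.append(l + '\n')
--     return rows
-- ===== Notes on version B (the rewrite author's own statement) =====
-- stated objective: alternative
-- what changed: Replaces A's single stateful pass (a data_section flag threaded through one loop) by locating the first '@data' line and doing two stateless passes: filter+map the attribute names before it, then filter+map the stripped data rows after it; no header is built at all when '@data' is absent.
import Mathlib
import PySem

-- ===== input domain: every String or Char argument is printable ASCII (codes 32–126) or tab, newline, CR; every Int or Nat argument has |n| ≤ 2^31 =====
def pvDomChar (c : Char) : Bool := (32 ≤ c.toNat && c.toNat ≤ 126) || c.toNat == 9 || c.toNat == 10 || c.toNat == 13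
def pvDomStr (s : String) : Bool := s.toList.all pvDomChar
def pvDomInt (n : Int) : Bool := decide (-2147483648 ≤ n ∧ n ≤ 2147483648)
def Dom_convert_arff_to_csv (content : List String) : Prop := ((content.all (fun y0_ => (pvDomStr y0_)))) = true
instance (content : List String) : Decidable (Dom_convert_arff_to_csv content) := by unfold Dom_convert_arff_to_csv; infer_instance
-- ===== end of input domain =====

-- B replaces A's one stateful loop (data_section flag) by split-at-'@data' plus two stateless
-- filter/map passes; same result, alternative decomposition (not claimed faster).

-- ===== PORT A =====
-- literal transliteration of A's loop; state = (data_section, header, csv_content).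
-- On a malformed '@attribute' line (no second token) Python raises IndexError: the port
-- returns the csv accumulated so far there; those inputs are excluded by Pre_.
def pvLoopA (ds : Bool) (header : List String) (csv : List String) : List String → List String
  | [] => csv
  | s :: rest =>
    let line := PySem.Str.strip s
    if line == "" || PySem.Str.startswith line "%" then pvLoopA ds header csv rest
    else if !ds then
      if PySem.Str.isIn "@attribute" (PySem.Str.lower line) then
        match PySem.List.pyGet? (PySem.Str.split₀Max line 2) 1 with
        | some p => pvLoopA ds (header ++ [PySem.Str.stripChars p "'\""]) csv rest
        | none => csv   -- IndexError in Python; outside Pre_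
      else if PySem.Str.isIn "@data" (PySem.Str.lower line) then
        pvLoopA true header (csv ++ [PySem.Str.join "," header ++ "\n"]) rest
      else pvLoopA ds header csv rest
    else
      if line != "" then pvLoopA ds header (csv ++ [line ++ "\n"]) rest
      else pvLoopA ds header csv rest

def convert_arff_to_csv (content : List String) : List String :=
  pvLoopA false [] [] content

-- ===== PORT B =====
-- helpers shared with Pre_ (predicates on a single input line)
def pvIsDataLine (s : String) : Bool :=
  let l := PySem.Str.strip s
  !(l == "" || PySem.Str.startswith l "%")
    && !PySem.Str.isIn "@attribute" (PySem.Str.lower l)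
    && PySem.Str.isIn "@data" (PySem.Str.lower l)

def pvAttrName? (s : String) : Option String :=
  let l := PySem.Str.strip s
  if l == "" || PySem.Str.startswith l "%" then none
  else if PySem.Str.isIn "@attribute" (PySem.Str.lower l) then
    (PySem.List.pyGet? (PySem.Str.split₀Max l 2) 1).map (fun p => PySem.Str.stripChars p "'\"")
  else none

def pvDataRow? (s : String) : Option String :=
  let l := PySem.Str.strip s
  if l == "" || PySem.Str.startswith l "%" then none else some (l ++ "\n")

def convert_arff_to_csv_alt (content : List String) : List String :=
  let before := content.takeWhile (fun s => !pvIsDataLine s)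
  match content.dropWhile (fun s => !pvIsDataLine s) with
  | [] => []
  | _ :: rest =>
    (PySem.Str.join "," (before.filterMap pvAttrName?) ++ "\n") :: rest.filterMap pvDataRow?

-- ===== PRECONDITION & SPEC =====
-- Pre_ excludes exactly the inputs on which A raises IndexError: a non-blank, non-comment
-- line in the header region (before the first '@data' line) that contains '@attribute'
-- but has fewer than two whitespace-separated tokens.
def Pre_convert_arff_to_csv (content : List String) : Prop :=
  ∀ s ∈ content.takeWhile (fun s => !pvIsDataLine s),
    (let l := PySem.Str.strip s
     !(l == "" || PySem.Str.startswith l "%")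
       && PySem.Str.isIn "@attribute" (PySem.Str.lower l)) = true →
    2 ≤ (PySem.Str.split₀Max (PySem.Str.strip s) 2).length

instance (content : List String) : Decidable (Pre_convert_arff_to_csv content) := by
  unfold Pre_convert_arff_to_csv; infer_instance

def pvWitness_convert_arff_to_csv : List String :=
  ["@relation qos", "% comment", "@attribute 'a b' numeric", "@attribute cls {0,1}", "",
   "@data", "1,0", "", "% c", "2,1"]

def Spec_convert_arff_to_csv (content : List String) (out : List String) : Prop :=
  out = convert_arff_to_csv_alt content
instance (content : List String) (out : List String) : Decidable (Spec_convert_arff_to_csv content out) := by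
  unfold Spec_convert_arff_to_csv; infer_instance

-- ===== CLAIM (what is proved, stated in full; the proofs are below) =====
def Claim_equal_convert_arff_to_csv : Prop := ∀ (content : List String), Dom_convert_arff_to_csv content → Pre_convert_arff_to_csv content → Spec_convert_arff_to_csv content (convert_arff_to_csv content)

-- ===== LEMMAS AND PROOFS =====

-- in data mode the loop is a filterMap
theorem pvLoopA_data (rest : List String) : ∀ (header csv : List String),
    pvLoopA true header csv rest = csv ++ rest.filterMap pvDataRow? := by
  induction rest with
  | nil => intro header csv; simp [pvLoopA]
  | cons s rest ih =>
    intro header csv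
    by_cases h : (PySem.Str.strip s == "" || PySem.Str.startswith (PySem.Str.strip s) "%") = true
    · have hrow : pvDataRow? s = none := by simp [pvDataRow?]; intro h1; simp_all
      simp only [pvLoopA, h, if_true, List.filterMap_cons, hrow]
      exact ih header csv
    · rw [Bool.not_eq_true] at h
      have hne : (PySem.Str.strip s != "") = true := by
        simp only [Bool.or_eq_false_iff, beq_eq_false_iff_ne] at h
        simp [bne, h.1]
      have hrow : pvDataRow? s = some (PySem.Str.strip s ++ "\n") := by
        simp only [pvDataRow?, h, Bool.false_eq_true, if_false]
      simp only [pvLoopA, h, Bool.false_eq_true, if_false, Bool.not_true, hne, if_true,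
        List.filterMap_cons, hrow]
      rw [ih]; simp

-- index 1 of a list of length ≥ 2 exists (for the '@attribute' split under Pre_)
theorem pvGet1 {α : Type} (xs : List α) (h : 2 ≤ xs.length) :
    ∃ p, PySem.List.pyGet? xs 1 = some p := by
  match xs, h with
  | a :: b :: t, _ => exact ⟨b, by simp [PySem.List.pyGet?, PySem.List.pyIdx?]⟩

-- header mode: the loop computes B's split-and-two-passes result
set_option maxHeartbeats 1600000 in
theorem pvLoopA_header (rest : List String) : ∀ (header csv : List String),
    (∀ s ∈ rest.takeWhile (fun s => !pvIsDataLine s),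
      (let l := PySem.Str.strip s
       !(l == "" || PySem.Str.startswith l "%")
         && PySem.Str.isIn "@attribute" (PySem.Str.lower l)) = true →
      2 ≤ (PySem.Str.split₀Max (PySem.Str.strip s) 2).length) →
    pvLoopA false header csv rest =
      csv ++ (match rest.dropWhile (fun s => !pvIsDataLine s) with
        | [] => []
        | _ :: after =>
          (PySem.Str.join ","
              (header ++ (rest.takeWhile (fun s => !pvIsDataLine s)).filterMap pvAttrName?)
              ++ "\n") :: after.filterMap pvDataRow?) := by
  induction rest with
  | nil => intro header csv _; simp [pvLoopA]
  | cons s rest ih =>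
    intro header csv hpre
    by_cases hd : pvIsDataLine s = true
    · -- this is the first '@data' line: switch to data mode
      have hskip : (PySem.Str.strip s == "" || PySem.Str.startswith (PySem.Str.strip s) "%") = false := by
        simp only [pvIsDataLine, Bool.and_eq_true, Bool.not_eq_eq_eq_not, Bool.not_true] at hd
        exact hd.1.1
      have hattr : PySem.Str.isIn "@attribute" (PySem.Str.lower (PySem.Str.strip s)) = false := by
        simp only [pvIsDataLine, Bool.and_eq_true, Bool.not_eq_eq_eq_not, Bool.not_true] at hd
        exact hd.1.2
      have hdata : PySem.Str.isIn "@data" (PySem.Str.lower (PySem.Str.strip s)) = true := by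
        simp only [pvIsDataLine, Bool.and_eq_true] at hd
        exact hd.2
      simp only [pvLoopA, hskip, if_false, Bool.not_false, if_true, hattr, hdata,
        Bool.false_eq_true, if_true, if_false]
      rw [pvLoopA_data]
      simp [hd]
    · -- still in the header region
      have hd' : (!pvIsDataLine s) = true := by simp [hd]
      have htw : (s :: rest).takeWhile (fun s => !pvIsDataLine s)
          = s :: rest.takeWhile (fun s => !pvIsDataLine s) := by
        simp [hd']
      have hdw : (s :: rest).dropWhile (fun s => !pvIsDataLine s)
          = rest.dropWhile (fun s => !pvIsDataLine s) := by
        simp [hd']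
      have hpre' : ∀ x ∈ rest.takeWhile (fun s => !pvIsDataLine s),
          (let l := PySem.Str.strip x
           !(l == "" || PySem.Str.startswith l "%")
             && PySem.Str.isIn "@attribute" (PySem.Str.lower l)) = true →
          2 ≤ (PySem.Str.split₀Max (PySem.Str.strip x) 2).length := by
        intro x hx
        exact hpre x (by rw [htw]; exact List.mem_cons_of_mem _ hx)
      rw [htw, hdw]
      by_cases hskip : (PySem.Str.strip s == "" || PySem.Str.startswith (PySem.Str.strip s) "%") = true
      · -- blank / comment line: skipped by both
        have hname : pvAttrName? s = none := by simp [pvAttrName?]; intro h1 h2; simp_all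
        simp only [pvLoopA, hskip, if_true]
        rw [ih header csv hpre']
        simp [hname]
      · by_cases hattr : PySem.Str.isIn "@attribute" (PySem.Str.lower (PySem.Str.strip s)) = true
        · -- '@attribute' line
          have hskip' : (PySem.Str.strip s == "" || PySem.Str.startswith (PySem.Str.strip s) "%") = false :=
            Bool.eq_false_iff.mpr hskip
          have hlen := hpre s (by rw [htw]; exact List.mem_cons_self ..)
            (by simp only [hskip', hattr, Bool.not_false, Bool.and_self])
          obtain ⟨p, hp⟩ := pvGet1 _ hlen
          have hname : pvAttrName? s = some (PySem.Str.stripChars p "'\"") := by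
            simp only [pvAttrName?, hskip', Bool.false_eq_true, if_false, hattr, if_true, hp,
              Option.map_some]
          simp only [pvLoopA, hskip, if_false, Bool.not_false, Bool.false_eq_true, if_true, if_false,
            hattr, hp]
          rw [ih (header ++ [PySem.Str.stripChars p "'\""]) csv hpre']
          simp [hname]
        · -- irrelevant header line (e.g. '@relation'): '@data' cannot be in it since ¬pvIsDataLine
          have hdata : PySem.Str.isIn "@data" (PySem.Str.lower (PySem.Str.strip s)) = false := by
            simp only [pvIsDataLine, Bool.and_eq_true, Bool.not_eq_eq_eq_not, Bool.not_true] at hd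
            by_contra hc
            simp only [Bool.not_eq_false] at hc
            exact hd ⟨⟨by simpa using hskip, by simpa using hattr⟩, hc⟩
          have hskip' : (PySem.Str.strip s == "" || PySem.Str.startswith (PySem.Str.strip s) "%") = false :=
            Bool.eq_false_iff.mpr hskip
          have hattr' : PySem.Str.isIn "@attribute" (PySem.Str.lower (PySem.Str.strip s)) = false :=
            Bool.eq_false_iff.mpr hattr
          have hname : pvAttrName? s = none := by
            simp only [pvAttrName?, hskip', Bool.false_eq_true, if_false, hattr']
          simp only [pvLoopA, hskip, if_false, Bool.not_false, Bool.false_eq_true, if_true, if_false,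
            hattr, hdata]
          rw [ih header csv hpre']
          simp [hname]

-- ===== VERDICT (by name: the statement is the Claim_ definition above) =====
theorem convert_arff_to_csv_spec : Claim_equal_convert_arff_to_csv := by
  intro content _ hpre
  unfold Spec_convert_arff_to_csv convert_arff_to_csv convert_arff_to_csv_alt
  rw [pvLoopA_header content [] [] hpre]
  simp
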